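-- pv_equiv track=rewrite | github.com/gimdongwon/Coding_Test | Dongwon/Test_question/PriviousTest_Kakao/2019/stone_bridge.py | check
-- ===== SOURCE A (Python) =====
-- def check(temp, k, mid):
--     disapper_stone = 0
--     for item in temp:
--         if item-mid <= 0:
--             disapper_stone += 1
--             if disapper_stone == k:
--                 return False
--         else:
--             disapper_stone = 0
--     return True
-- ===== SOURCE B (Python) =====
-- def check(temp, k, mid):
--     i, n = 0, len(temp)
--     while i < n:
--         if temp[i] <= mid:
--             j = i
--             while j < n and temp[j] <= mid:
--                 j += 1
--             if j - i >= k: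
--                 return False
--             i = j
--         else:
--             i += 1
--     return True
-- ===== Notes on version B (the rewrite author's own statement) =====
-- stated objective: alternative
-- what changed: Replaced the running-counter-and-reset state machine by a two-pointer run scan: each maximal run of submerged stones is measured at once and compared to k with >=.
-- outside the precondition, e.g. on check([0], 0, 0): A returns True, B returns False
import Mathlib
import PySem

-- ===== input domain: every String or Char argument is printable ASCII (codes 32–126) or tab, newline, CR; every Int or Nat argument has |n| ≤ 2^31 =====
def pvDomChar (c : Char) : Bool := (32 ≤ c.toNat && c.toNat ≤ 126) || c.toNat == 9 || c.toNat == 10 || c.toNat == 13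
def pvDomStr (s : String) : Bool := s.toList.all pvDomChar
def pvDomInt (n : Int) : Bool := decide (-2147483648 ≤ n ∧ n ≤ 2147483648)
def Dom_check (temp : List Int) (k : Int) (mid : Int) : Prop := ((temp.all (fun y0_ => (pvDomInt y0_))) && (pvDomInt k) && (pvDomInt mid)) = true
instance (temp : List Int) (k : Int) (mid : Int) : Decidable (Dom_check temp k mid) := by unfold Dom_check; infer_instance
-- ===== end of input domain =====

-- B replaces A's running-counter-and-reset state machine by a run-scan: each maximal
-- run of submerged stones is measured at once and compared to k (alternative, same cost).


-- ===== PORT A =====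
-- counter state machine: disapper_stone counts the current run, reset on a dry stone
def checkAux (temp : List Int) (k : Int) (mid : Int) (d : Int) : Bool :=
  match temp with
  | [] => true
  | item :: rest =>
    if item - mid ≤ 0 then
      if d + 1 = k then false else checkAux rest k mid (d + 1)
    else checkAux rest k mid 0

def check (temp : List Int) (k : Int) (mid : Int) : Bool := checkAux temp k mid 0

-- ===== PORT B =====
-- length of the leading run of elements ≤ mid (B's inner while loop)
def runLen (xs : List Int) (mid : Int) : Nat :=
  match xs with
  | [] => 0
  | x :: xs => if x ≤ mid then runLen xs mid + 1 else 0

def check_alt (temp : List Int) (k : Int) (mid : Int) : Bool :=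
  match temp with
  | [] => true
  | x :: xs =>
    if x ≤ mid then
      let r := runLen xs mid
      if ((r : Int) + 1) ≥ k then false else check_alt (xs.drop r) k mid
    else check_alt xs k mid
termination_by temp.length
decreasing_by all_goals simp

-- ===== PRECONDITION & SPEC =====
-- Pre_ excludes the degenerate threshold k ≤ 0 when some stone is submerged: there A's
-- `== k` test never fires (counter starts above k) and returns True, while B's natural
-- run-length ≥ k test returns False; both values are defensible on this unspecified corner.
def Pre_check (temp : List Int) (k : Int) (mid : Int) : Prop :=
  1 ≤ k ∨ ∀ x ∈ temp, mid < x
instance (temp : List Int) (k : Int) (mid : Int) : Decidable (Pre_check temp k mid) := by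
  unfold Pre_check; infer_instance
def pvWitness_check : List Int × Int × Int := ([1, 2, 0], 2, 1)
def Spec_check (temp : List Int) (k : Int) (mid : Int) (out : Bool) : Prop := out = check_alt temp k mid
instance (temp : List Int) (k : Int) (mid : Int) (out : Bool) : Decidable (Spec_check temp k mid out) := by unfold Spec_check; infer_instance

-- ===== CLAIM (what is proved, stated in full; the proofs are below) =====
def Claim_equal_check : Prop := ∀ (temp : List Int) (k : Int) (mid : Int), Dom_check temp k mid → Pre_check temp k mid → Spec_check temp k mid (check temp k mid)

-- ===== LEMMAS AND PROOFS =====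

-- B unfolded one maximal run at a time (valid for k ≥ 1)
theorem alt_unfold (temp : List Int) (k mid : Int) (hk : 1 ≤ k) :
    check_alt temp k mid =
      if ((runLen temp mid : Int)) ≥ k then false
      else check_alt (temp.drop (runLen temp mid)) k mid := by
  match temp with
  | [] => simp [check_alt, runLen]; omega
  | x :: xs =>
    by_cases hx : x ≤ mid
    · simp only [check_alt, runLen, hx, if_pos]
      have : ((runLen xs mid + 1 : Nat) : Int) = (runLen xs mid : Int) + 1 := by push_cast; ring
      rw [this]
      rfl
    · simp [check_alt, runLen, hx]
      omega

-- invariant of A's counter loop, in terms of B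
theorem aux_inv (k mid : Int) (hk : 1 ≤ k) :
    ∀ (temp : List Int) (d : Int), 0 ≤ d → d < k →
      checkAux temp k mid d =
        if ((runLen temp mid : Int)) + d ≥ k then false
        else check_alt (temp.drop (runLen temp mid)) k mid := by
  intro temp
  induction temp with
  | nil => intro d h0 hd; simp [checkAux, runLen, check_alt]; omega
  | cons x xs ih =>
    intro d h0 hd
    by_cases hx : x ≤ mid
    · have hx' : x - mid ≤ 0 := by omega
      simp only [checkAux, runLen, hx, hx', if_pos]
      by_cases hk' : d + 1 = k
      · have hge : ((runLen xs mid + 1 : Nat) : Int) + d ≥ k := by push_cast; omega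
        rw [if_pos hk', if_pos hge]
      · rw [if_neg hk', ih (d + 1) (by omega) (by omega)]
        have hcast : ((runLen xs mid + 1 : Nat) : Int) = (runLen xs mid : Int) + 1 := by
          push_cast; ring
        rw [hcast]
        have hiff : ((runLen xs mid : Int) + (d + 1) ≥ k) ↔ ((runLen xs mid : Int) + 1 + d ≥ k) := by omega
        by_cases hc : (runLen xs mid : Int) + (d + 1) ≥ k
        · simp [hc, hiff.mp hc]
        · rw [if_neg hc, if_neg (by omega)]
          rfl
    · have hx' : ¬ (x - mid ≤ 0) := by omega
      simp only [checkAux, runLen, hx, hx', if_false]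
      rw [ih 0 le_rfl (by omega)]
      have hnd : ¬ (((0 : Nat) : Int) + d ≥ k) := by simp; omega
      rw [if_neg hnd, List.drop_zero, add_zero]
      rw [← alt_unfold xs k mid hk]
      simp [check_alt, hx]

-- if every stone is dry, both return true (covers the k ≤ 0 disjunct of Pre_)
theorem aux_all_dry (k mid : Int) :
    ∀ (temp : List Int), (∀ x ∈ temp, mid < x) → checkAux temp k mid 0 = true := by
  intro temp
  induction temp with
  | nil => intro _; rfl
  | cons x xs ih =>
    intro h
    have hx : ¬ (x - mid ≤ 0) := by have := h x (by simp); omega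
    simp only [checkAux, hx, if_false]
    exact ih (fun y hy => h y (by simp [hy]))

theorem alt_all_dry (k mid : Int) :
    ∀ (temp : List Int), (∀ x ∈ temp, mid < x) → check_alt temp k mid = true := by
  intro temp
  induction temp with
  | nil => intro _; simp [check_alt]
  | cons x xs ih =>
    intro h
    have hx : ¬ (x ≤ mid) := by have := h x (by simp); omega
    simp only [check_alt, hx, if_false]
    exact ih (fun y hy => h y (by simp [hy]))

-- ===== VERDICT (by name: the statement is the Claim_ definition above) =====
theorem check_spec : Claim_equal_check := by
  intro temp k mid _ hpre
  unfold Spec_check check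
  rcases hpre with hk | hdry
  · rw [aux_inv k mid hk temp 0 le_rfl (by omega), alt_unfold temp k mid hk]
    simp
  · rw [aux_all_dry k mid temp hdry, alt_all_dry k mid temp hdry]
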